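-- pv_equiv track=rewrite | github.com/keith-packard/aoc-2019 | big.py | big_to_int
-- ===== SOURCE A (Python) =====
-- def big_to_int(b):
--     i = 0
--     f = 1
--     sign = None
--     for c in b:
--         if sign is None:
--             sign = 1
--             if c == '-':
--                 sign = -1
--         else:
--             i += f * (ord(c) - ord('0'))
--             f *= 10
--     return i * sign
-- ===== SOURCE B (Python) =====
-- def big_to_int(b):
--     if not b:
--         return 0
--     sign = -1 if b[0] == '-' else 1
--     value = 0
--     for c in reversed(b[1:]):
--         value = value * 10 + (ord(c) - ord('0'))
--     return value * sign
-- ===== Notes on version B (the rewrite author's own statement) =====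
-- stated objective: alternative
-- what changed: Replaces the increasing place-value accumulator (i += f*digit; f *= 10) with a most-significant-first Horner fold over the reversed digit suffix, after reading the sign directly from b[0].
-- crash fix: On the empty string A raises TypeError (0 * None) while B returns 0. — e.g. on big_to_int(""): A raises TypeError, B returns 0
import Mathlib
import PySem

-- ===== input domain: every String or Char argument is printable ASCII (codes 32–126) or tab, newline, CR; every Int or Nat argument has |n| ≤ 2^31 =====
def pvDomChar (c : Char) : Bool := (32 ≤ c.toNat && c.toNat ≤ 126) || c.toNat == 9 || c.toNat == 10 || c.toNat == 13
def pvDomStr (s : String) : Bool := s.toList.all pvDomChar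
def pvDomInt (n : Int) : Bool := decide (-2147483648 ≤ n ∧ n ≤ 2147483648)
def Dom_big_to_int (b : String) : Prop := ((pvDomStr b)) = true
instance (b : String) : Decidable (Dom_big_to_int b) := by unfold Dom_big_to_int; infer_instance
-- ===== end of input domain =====

-- B reads the sign from b[0] and computes the magnitude with a most-significant-first
-- Horner fold over the reversed digit suffix, instead of A's increasing place-value accumulator.

-- ===== PORT A =====
-- state (i, f, sign); sign = none is Python's `sign = None` sentinel
def big_to_int (b : String) : Int :=
  let st := b.toList.foldl
    (fun (st : Int × Int × Option Int) c =>
      match st.2.2 with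
      | none => (st.1, st.2.1, some (if c = '-' then (-1 : Int) else 1))
      | some s => (st.1 + st.2.1 * ((c.toNat : Int) - ('0'.toNat : Int)), st.2.1 * 10, some s))
    (0, 1, none)
  match st.2.2 with
  | some s => st.1 * s
  | none => 0   -- Python raises TypeError here (empty b, `0 * None`); excluded by Pre_

-- ===== PORT B =====
def big_to_int_alt (b : String) : Int :=
  match b.toList with
  | [] => 0
  | c :: rest =>
    let sign : Int := if c = '-' then -1 else 1
    let value := rest.reverse.foldl
      (fun v c => v * 10 + ((c.toNat : Int) - ('0'.toNat : Int))) 0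
    value * sign

-- ===== PRECONDITION & SPEC =====
-- Pre_ excludes only the empty string, on which A raises TypeError (0 * None).
def Pre_big_to_int (b : String) : Prop := b ≠ ""
instance (b : String) : Decidable (Pre_big_to_int b) := by unfold Pre_big_to_int; infer_instance
def pvWitness_big_to_int : String := "-42"

-- On the empty string A raises TypeError (0 * None) while B returns 0.
def Raises_big_to_int (b : String) : Prop := b = ""
instance (b : String) : Decidable (Raises_big_to_int b) := by unfold Raises_big_to_int; infer_instance
def pvRaiseWitness_big_to_int : String := ""
def pvRaiseWitnessOut_big_to_int : Int := 0

def Spec_big_to_int (b : String) (out : Int) : Prop := out = big_to_int_alt b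
instance (b : String) (out : Int) : Decidable (Spec_big_to_int b out) := by unfold Spec_big_to_int; infer_instance

-- ===== CLAIM (what is proved, stated in full; the proofs are below) =====
def Claim_equal_big_to_int : Prop := ∀ (b : String), Dom_big_to_int b → Pre_big_to_int b → Spec_big_to_int b (big_to_int b)
def Claim_raises_big_to_int : Prop := (∀ (b : String), Dom_big_to_int b → Raises_big_to_int b → ¬ Pre_big_to_int b) ∧ (Dom_big_to_int (pvRaiseWitness_big_to_int) ∧ Raises_big_to_int (pvRaiseWitness_big_to_int) ∧ big_to_int_alt (pvRaiseWitness_big_to_int) = pvRaiseWitnessOut_big_to_int)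

-- ===== LEMMAS AND PROOFS =====

-- little-endian value of a digit list
def pvLE : List Char → Int
  | [] => 0
  | c :: cs => ((c.toNat : Int) - ('0'.toNat : Int)) + 10 * pvLE cs

theorem pvFoldA (l : List Char) : ∀ (i f s : Int),
    (l.foldl
      (fun (st : Int × Int × Option Int) c =>
        match st.2.2 with
        | none => (st.1, st.2.1, some (if c = '-' then (-1 : Int) else 1))
        | some s => (st.1 + st.2.1 * ((c.toNat : Int) - ('0'.toNat : Int)), st.2.1 * 10, some s))
      (i, f, some s)) = (i + f * pvLE l, f * 10 ^ l.length, some s) := by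
  induction l with
  | nil => intro i f s; simp [pvLE]
  | cons c cs ih =>
    intro i f s
    simp only [List.foldl_cons, ih, pvLE, List.length_cons]
    ring_nf

theorem pvFoldB (l : List Char) : ∀ (v : Int),
    (l.reverse.foldl (fun v c => v * 10 + ((c.toNat : Int) - ('0'.toNat : Int))) v)
      = v * 10 ^ l.length + pvLE l := by
  induction l with
  | nil => intro v; simp [pvLE]
  | cons c cs ih =>
    intro v
    simp only [List.reverse_cons, List.foldl_append, List.foldl_cons, List.foldl_nil, ih,
      pvLE, List.length_cons]
    ring_nf

-- ===== VERDICT (by name: the statement is the Claim_ definition above) =====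
theorem big_to_int_spec : Claim_equal_big_to_int := by
  intro b _ hpre
  unfold Spec_big_to_int big_to_int big_to_int_alt
  cases hl : b.toList with
  | nil =>
    exact absurd (by rwa [String.toList_eq_nil_iff] at hl) hpre
  | cons c rest =>
    simp only [List.foldl_cons]
    rw [pvFoldA, pvFoldB]
    ring_nf

@[simp] theorem big_to_int_raises : Claim_raises_big_to_int := by
  unfold Claim_raises_big_to_int
  constructor
  · intro b _ hr hp; exact hp hr
  · exact ⟨by decide, by decide, by decide⟩
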